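-- pv_equiv track=rewrite | github.com/yanshg/algorithms | misc/parenthese_validate_with_star.py | check_if_extra_left_parenthese
-- ===== SOURCE A (Python) =====
-- def check_if_extra_left_parenthese(s):
--     need_left = 0
--     for c in reversed(s):
--         # assume '*' is ')'
--         if c == ')' or c == '*':
--             need_left += 1
--         elif c == '(':
--             need_left -= 1
--             if need_left < 0:
--                 return True
--     return False
-- ===== SOURCE B (Python) =====
-- def check_if_extra_left_parenthese(s):
--     bal = 0
--     mn = 0
--     for c in s:
--         if c == '(':
--             w = 1
--         elif c == ')' or c == '*':
--             w = -1
--         else: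
--             w = 0
--         bal += w
--         mn = min(mn, bal)
--     return mn < bal
-- ===== Notes on version B (the rewrite author's own statement) =====
-- stated objective: alternative
-- what changed: Replaced the reversed scan with a right-deficit counter and early return by a single forward pass that accumulates the total weight and the minimum prefix weight ((=+1, )/*=-1, else 0) and returns total > min_prefix.
import Mathlib
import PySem

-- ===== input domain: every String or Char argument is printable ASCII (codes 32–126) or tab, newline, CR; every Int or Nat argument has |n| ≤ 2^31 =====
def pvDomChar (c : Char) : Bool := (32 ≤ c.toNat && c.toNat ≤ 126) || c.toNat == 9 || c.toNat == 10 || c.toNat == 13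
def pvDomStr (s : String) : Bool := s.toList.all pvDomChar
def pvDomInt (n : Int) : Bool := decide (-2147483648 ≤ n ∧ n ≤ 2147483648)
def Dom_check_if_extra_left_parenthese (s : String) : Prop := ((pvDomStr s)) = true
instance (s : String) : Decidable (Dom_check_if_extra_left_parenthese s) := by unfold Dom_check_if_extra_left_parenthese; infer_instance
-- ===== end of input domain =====

-- B replaces A's reversed scan (deficit counter, early return) by one forward pass computing
-- the total weight and minimum prefix weight and comparing them; alternative algorithm, same cost.


-- ===== PORT A =====
-- A's loop over reversed(s): need_left counter, early return True when it goes negative.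
def recA : List Char → Int → Bool
  | [], _ => false
  | c :: cs, need =>
    if c = ')' ∨ c = '*' then recA cs (need + 1)
    else if c = '(' then
      (if need - 1 < 0 then true else recA cs (need - 1))
    else recA cs need

def check_if_extra_left_parenthese (s : String) : Bool :=
  recA s.toList.reverse 0

-- ===== PORT B =====
-- weight of a character: '(' → +1, ')' or '*' → -1, anything else → 0
def wgt (c : Char) : Int :=
  if c = '(' then 1 else if c = ')' ∨ c = '*' then -1 else 0

-- forward loop maintaining (running balance, minimum balance seen)
def loopB : List Char → Int → Int → Int × Int
  | [], bal, mn => (bal, mn)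
  | c :: cs, bal, mn => loopB cs (bal + wgt c) (min mn (bal + wgt c))

def check_if_extra_left_parenthese_alt (s : String) : Bool :=
  let p := loopB s.toList 0 0
  decide (p.2 < p.1)

-- ===== PRECONDITION & SPEC =====
def Spec_check_if_extra_left_parenthese (s : String) (out : Bool) : Prop := out = check_if_extra_left_parenthese_alt s
instance (s : String) (out : Bool) : Decidable (Spec_check_if_extra_left_parenthese s out) := by unfold Spec_check_if_extra_left_parenthese; infer_instance

-- ===== CLAIM (what is proved, stated in full; the proofs are below) =====
def Claim_equal_check_if_extra_left_parenthese : Prop := ∀ (s : String), Dom_check_if_extra_left_parenthese s → Spec_check_if_extra_left_parenthese s (check_if_extra_left_parenthese s)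

-- ===== LEMMAS AND PROOFS =====

-- total weight of a list
def sw : List Char → Int
  | [] => 0
  | c :: cs => wgt c + sw cs

-- minimum, over all prefixes (including the empty one), of the prefix weight
def pW : List Char → Int
  | [] => 0
  | c :: cs => min 0 (wgt c + pW cs)

-- minimum, over all prefixes (including the empty one), of the prefix A-weight (A's reversed
-- direction: ')'/'*' count +1, '(' counts -1); vA c = -(wgt c).
def mP : List Char → Int
  | [] => 0
  | c :: cs => min 0 (mP cs - wgt c)

theorem pW_nonpos (l : List Char) : pW l ≤ 0 := by
  cases l <;> simp [pW]

theorem mP_nonpos (l : List Char) : mP l ≤ 0 := by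
  cases l <;> simp [mP]

theorem sw_append (a b : List Char) : sw (a ++ b) = sw a + sw b := by
  induction a with
  | nil => simp [sw]
  | cons c a ih => simp [sw, ih]; ring

theorem sw_reverse (l : List Char) : sw l.reverse = sw l := by
  induction l with
  | nil => rfl
  | cons c cs ih => simp [List.reverse_cons, sw_append, sw, ih]; ring

-- A's result as a comparison against mP
theorem recA_eq (l : List Char) : ∀ n : Int, 0 ≤ n → recA l n = decide (n + mP l < 0) := by
  induction l with
  | nil => intro n hn; simp [recA, mP]; omega
  | cons c cs ih =>
    intro n hn
    have hm := mP_nonpos cs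
    by_cases h1 : c = ')' ∨ c = '*'
    · have : wgt c = -1 := by
        rcases h1 with h | h <;> simp [wgt, h]
      simp [recA, h1, mP, this, ih (n + 1) (by omega)]
      omega
    · by_cases h2 : c = '('
      · subst h2
        have hw : wgt '(' = 1 := by simp [wgt]
        by_cases h3 : n - 1 < 0
        · simp [recA, h3, mP, hw]
          omega
        · simp [recA, h3, mP, hw, ih (n - 1) (by omega)]
          omega
      · have : wgt c = 0 := by simp [wgt, h1, h2]
        simp [recA, h1, h2, mP, this, ih n hn]
        omega

-- mP over an appended list
theorem mP_append (a b : List Char) : mP (a ++ b) = min (mP a) (mP b - sw a) := by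
  induction a with
  | nil => have := mP_nonpos b; simp [mP, sw]; omega
  | cons c a ih => simp [mP, sw, ih]; omega

-- bridge: A's reversed-direction prefix minimum equals B's prefix minimum shifted by the total
theorem mP_reverse (l : List Char) : mP l.reverse = pW l - sw l := by
  induction l with
  | nil => simp [mP, pW, sw]
  | cons c cs ih =>
    have hp := pW_nonpos cs
    simp [List.reverse_cons, mP_append, sw_reverse, ih, mP, pW, sw]
    omega

-- B's loop computes (total, minimum prefix)
theorem loopB_eq (l : List Char) : ∀ bal mn : Int, mn ≤ bal →
    loopB l bal mn = (bal + sw l, min mn (bal + pW l)) := by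
  induction l with
  | nil => intro bal mn h; simp [loopB, sw, pW]; omega
  | cons c cs ih =>
    intro bal mn h
    have hp := pW_nonpos cs
    rw [loopB, ih (bal + wgt c) (min mn (bal + wgt c)) (by omega)]
    simp [sw, pW]
    constructor
    · ring
    · omega

-- ===== VERDICT (by name: the statement is the Claim_ definition above) =====
theorem check_if_extra_left_parenthese_spec : Claim_equal_check_if_extra_left_parenthese := by
  intro s _
  unfold Spec_check_if_extra_left_parenthese check_if_extra_left_parenthese
    check_if_extra_left_parenthese_alt
  rw [recA_eq _ 0 le_rfl, loopB_eq _ 0 0 le_rfl, mP_reverse]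
  have := pW_nonpos s.toList
  simp
  omega
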